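-- pv_equiv track=rewrite | github.com/nvrtmd/algorithm-solving | Programmers/Programmers 015.py | solution
-- ===== SOURCE A (Python) =====
-- def solution(board, nums):
--     answer = 0
--
--     # 체크할 번호들을 set으로 생성
--     numbers = set(nums)
--     board_size = len(board)
--
--     # 보드의 크기만큼 0으로 채워진 배열 2개 생성
--     # 배열 내 요소들은 각각 해당 인덱스의 행, 열별로 체크된 칸의 개수를 나타냄
--     # ex. row_line[2] = 3 이면 3번 째 행의 체크된 칸의 개수가 총 3개
--     row_line = [0] * board_size
--     column_line = [0] * board_size
--
--     # 두 개의 대각선 내에 위치한 칸에 대한 개수 체크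
--     right_diagonal_line = 0
--     left_diagonal_line = 0
--
--     for row in range(board_size):
--         for column in range(board_size):
--             # 만약 해당 칸의 숫자가 numbers 내에 존재하면
--             if board[row][column] in numbers:
--                 # 행과 열 배열(row_line, column_line) 내 해당 칸의 행과 열에 해당하는 인덱스의 값을 1 더함
--                 row_line[row] += 1
--                 column_line[column] += 1
--
--                 # 만약 해당 칸의 행과 열 숫자가 같으면 좌측 하단을 향한 대각선 내의 칸이므로
--                 # right_diagonal_line에 1을 더함
--                 if row == column:
--                     right_diagonal_line += 1
--
--                 # 해당 칸의 행과 열 숫자의 합이 board_size - 1인 경우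
--                 # 우측 하단을 향한 대각선 내의 칸이므로 left_diagonal_line에 1을 더함
--                 if row + column == board_size - 1:
--                     left_diagonal_line += 1
--
--     # 대각선 변수를 board_size로 나눈 나머지(각각 0 또는 1)를 answer에 더함
--     answer = right_diagonal_line // board_size + left_diagonal_line // board_size
--
--     # 행과 열 배열(row_line, column_line)의 요소를 각각 순회하며 해당 요소가 board_sized이면
--     # 해당 행 또는 열 내의 모든 칸들이 체크되었다는 뜻이므로 answer 변수에 1씩 더함
--     answer += sum([1 for i in range(board_size) if row_line[i] == board_size])
--     answer += sum([1 for i in range(board_size)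
--                   if column_line[i] == board_size])
--     return answer
-- ===== SOURCE B (Python) =====
-- def solution(board, nums):
--     n = len(board)
--     numbers = set(nums)
--     rows = sum(all(board[r][c] in numbers for c in range(n)) for r in range(n))
--     cols = sum(all(board[r][c] in numbers for r in range(n)) for c in range(n))
--     diag = all(board[i][i] in numbers for i in range(n))
--     anti = all(board[i][n - 1 - i] in numbers for i in range(n))
--     return rows + cols + int(diag) + int(anti)
-- ===== Notes on version B (the rewrite author's own statement) =====
-- stated objective: simpler
-- what changed: B replaces A's per-cell tally (mutable row/column counter arrays plus diagonal counters finished off with a //-based fullness test) by direct per-line checks: one all() over each row, column and the two diagonals, summed as booleans.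
import Mathlib
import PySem

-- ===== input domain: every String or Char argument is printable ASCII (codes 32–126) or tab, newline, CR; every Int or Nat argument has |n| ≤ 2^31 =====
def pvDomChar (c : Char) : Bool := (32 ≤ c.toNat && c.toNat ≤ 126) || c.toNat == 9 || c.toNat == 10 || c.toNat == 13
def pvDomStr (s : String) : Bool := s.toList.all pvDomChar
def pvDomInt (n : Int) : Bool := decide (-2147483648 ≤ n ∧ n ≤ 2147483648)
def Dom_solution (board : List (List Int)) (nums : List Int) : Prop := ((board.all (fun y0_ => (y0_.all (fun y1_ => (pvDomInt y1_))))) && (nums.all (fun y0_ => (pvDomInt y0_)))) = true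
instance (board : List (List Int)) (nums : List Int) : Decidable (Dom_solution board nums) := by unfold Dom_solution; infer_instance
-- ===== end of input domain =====

-- B replaces A's per-cell tally with per-line all() checks; objective: simpler. Return-value equivalence only.

-- ===== PORT A =====
-- board[row][column] for row,column drawn from range(board_size): indices are naturals,
-- and Pre_ guarantees they are in range, so getD is exact there.
def cellAt (board : List (List Int)) (r c : Nat) : Int := (board.getD r []).getD c 0

def markAt (board : List (List Int)) (numbers : PySem.Set Int) (r c : Nat) : Bool :=
  PySem.Set.contains numbers (cellAt board r c)

-- one body of A's inner loop (state = (row_line, column_line, right_diagonal, left_diagonal))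
def aStep (mark : Nat → Nat → Bool) (n r : Nat)
    (st : List Int × List Int × Int × Int) (c : Nat) : List Int × List Int × Int × Int :=
  if mark r c then
    (st.1.set r (st.1.getD r 0 + 1),
     st.2.1.set c (st.2.1.getD c 0 + 1),
     (if r = c then st.2.2.1 + 1 else st.2.2.1),
     (if r + c = n - 1 then st.2.2.2 + 1 else st.2.2.2))
  else st

def solution (board : List (List Int)) (nums : List Int) : Int :=
  let numbers := PySem.Set.ofList nums
  let boardSize := board.length
  let st :=
    (List.range boardSize).foldl
      (fun st row => (List.range boardSize).foldl (aStep (markAt board numbers) boardSize row) st)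
      (List.replicate boardSize (0 : Int), List.replicate boardSize (0 : Int), (0 : Int), (0 : Int))
  let answer := PySem.Int.floordiv st.2.2.1 (boardSize : Int) +
                PySem.Int.floordiv st.2.2.2 (boardSize : Int)
  let answer := answer +
    (List.range boardSize).foldl (fun a i => if st.1.getD i 0 = (boardSize : Int) then a + 1 else a) 0
  answer +
    (List.range boardSize).foldl (fun a i => if st.2.1.getD i 0 = (boardSize : Int) then a + 1 else a) 0

-- ===== PORT B =====
def solution_alt (board : List (List Int)) (nums : List Int) : Int :=
  let n := board.length
  let numbers := PySem.Set.ofList nums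
  let rows := ((List.range n).countP (fun r => (List.range n).all (fun c => markAt board numbers r c)) : Int)
  let cols := ((List.range n).countP (fun c => (List.range n).all (fun r => markAt board numbers r c)) : Int)
  let diag : Int := if (List.range n).all (fun i => markAt board numbers i i) then 1 else 0
  let anti : Int := if (List.range n).all (fun i => markAt board numbers i (n - 1 - i)) then 1 else 0
  rows + cols + diag + anti

-- ===== PRECONDITION & SPEC =====
-- Pre_ excludes exactly the inputs where Python A raises: the empty board (ZeroDivisionError
-- from // board_size) and jagged boards with a row shorter than board_size (IndexError).
def Pre_solution (board : List (List Int)) (nums : List Int) : Prop :=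
  board ≠ [] ∧ ∀ row ∈ board, board.length ≤ row.length
instance (board : List (List Int)) (nums : List Int) : Decidable (Pre_solution board nums) := by
  unfold Pre_solution; infer_instance
def pvWitness_solution : List (List Int) × List Int := ([[1]], [1])

def Spec_solution (board : List (List Int)) (nums : List Int) (out : Int) : Prop := out = solution_alt board nums
instance (board : List (List Int)) (nums : List Int) (out : Int) : Decidable (Spec_solution board nums out) := by unfold Spec_solution; infer_instance

-- ===== CLAIM (what is proved, stated in full; the proofs are below) =====
def Claim_equal_solution : Prop := ∀ (board : List (List Int)) (nums : List Int), Dom_solution board nums → Pre_solution board nums → Spec_solution board nums (solution board nums)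

-- ===== LEMMAS AND PROOFS =====

lemma getD_set_int (xs : List Int) (r : Nat) (v : Int) (i : Nat) (hr : r < xs.length) :
    (xs.set r v).getD i 0 = if i = r then v else xs.getD i 0 := by
  by_cases h : i = r
  · subst h; simp [List.getD_eq_getElem?_getD, hr]
  · simp [List.getD_eq_getElem?_getD, List.getElem?_set_ne (fun hne => h hne.symm), h]

lemma countP_int_sum (l : List Nat) (p : Nat → Bool) :
    (l.map (fun x => if p x then (1 : Int) else 0)).sum = (l.countP p : Int) := by
  induction l with
  | nil => simp
  | cons a l ih =>
    simp only [List.map_cons, List.sum_cons, List.countP_cons, ih]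
    split <;> simp_all <;> omega

-- inner loop characterisation
lemma aInner_char (mark : Nat → Nat → Bool) (n r : Nat) (cs : List Nat)
    (st : List Int × List Int × Int × Int)
    (hr : r < st.1.length) (hcs : ∀ c ∈ cs, c < st.2.1.length) :
    (cs.foldl (aStep mark n r) st).1.length = st.1.length ∧
    (cs.foldl (aStep mark n r) st).2.1.length = st.2.1.length ∧
    (∀ i, (cs.foldl (aStep mark n r) st).1.getD i 0 =
      st.1.getD i 0 + (if i = r then (cs.countP (mark r) : Int) else 0)) ∧
    (∀ j, (cs.foldl (aStep mark n r) st).2.1.getD j 0 =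
      st.2.1.getD j 0 + (cs.countP (fun c => decide (c = j) && mark r c) : Int)) ∧
    (cs.foldl (aStep mark n r) st).2.2.1 =
      st.2.2.1 + (cs.countP (fun c => decide (r = c) && mark r c) : Int) ∧
    (cs.foldl (aStep mark n r) st).2.2.2 =
      st.2.2.2 + (cs.countP (fun c => decide (r + c = n - 1) && mark r c) : Int) := by
  induction cs generalizing st with
  | nil => simp
  | cons c cs ih =>
    have hc : c < st.2.1.length := hcs c (by simp)
    by_cases hm : mark r c = true
    · have hstep : aStep mark n r st c =
        (st.1.set r (st.1.getD r 0 + 1),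
         st.2.1.set c (st.2.1.getD c 0 + 1),
         (if r = c then st.2.2.1 + 1 else st.2.2.1),
         (if r + c = n - 1 then st.2.2.2 + 1 else st.2.2.2)) := by
        simp [aStep, hm]
      obtain ⟨L1, L2, H1, H2, H3, H4⟩ := ih (st := aStep mark n r st c)
        (by rw [hstep]; simpa using hr)
        (by intro x hx; rw [hstep]; simpa using hcs x (by simp [hx]))
      rw [List.foldl_cons]
      refine ⟨by rw [L1, hstep]; simp, by rw [L2, hstep]; simp, ?_, ?_, ?_, ?_⟩
      · intro i
        rw [H1 i, hstep]
        simp only [List.countP_cons, hm]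
        rw [getD_set_int _ _ _ _ hr]
        by_cases hir : i = r <;> simp [hir] <;> push_cast <;> ring
      · intro j
        rw [H2 j, hstep]
        simp only [List.countP_cons, hm, Bool.and_true]
        rw [getD_set_int _ _ _ _ hc]
        by_cases hjc : c = j
        · subst hjc; simp; push_cast; ring
        · simp [hjc, Ne.symm hjc]
      · rw [H3, hstep]
        simp only [List.countP_cons, hm, Bool.and_true]
        by_cases hrc : r = c <;> simp [hrc] <;> push_cast <;> ring
      · rw [H4, hstep]
        simp only [List.countP_cons, hm, Bool.and_true]
        by_cases hd : r + c = n - 1 <;> simp [hd] <;> push_cast <;> ring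
    · have hstep : aStep mark n r st c = st := by simp [aStep, hm]
      rw [List.foldl_cons, hstep]
      obtain ⟨L1, L2, H1, H2, H3, H4⟩ := ih (st := st) hr (fun x hx => hcs x (by simp [hx]))
      simp only [List.countP_cons, hm]
      exact ⟨L1, L2, by simpa using H1, by simpa using H2, by simpa using H3, by simpa using H4⟩

-- outer loop characterisation
lemma aOuter_char (mark : Nat → Nat → Bool) (n : Nat) (rs : List Nat)
    (st : List Int × List Int × Int × Int)
    (hrs : ∀ r ∈ rs, r < st.1.length) (hn : n ≤ st.2.1.length) :
    (rs.foldl (fun st r => (List.range n).foldl (aStep mark n r) st) st).1.length = st.1.length ∧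
    (rs.foldl (fun st r => (List.range n).foldl (aStep mark n r) st) st).2.1.length = st.2.1.length ∧
    (∀ i, (rs.foldl (fun st r => (List.range n).foldl (aStep mark n r) st) st).1.getD i 0 =
      st.1.getD i 0 + (rs.map (fun r => if i = r then ((List.range n).countP (mark r) : Int) else 0)).sum) ∧
    (∀ j, (rs.foldl (fun st r => (List.range n).foldl (aStep mark n r) st) st).2.1.getD j 0 =
      st.2.1.getD j 0 + (rs.map (fun r => ((List.range n).countP (fun c => decide (c = j) && mark r c) : Int))).sum) ∧
    (rs.foldl (fun st r => (List.range n).foldl (aStep mark n r) st) st).2.2.1 =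
      st.2.2.1 + (rs.map (fun r => ((List.range n).countP (fun c => decide (r = c) && mark r c) : Int))).sum ∧
    (rs.foldl (fun st r => (List.range n).foldl (aStep mark n r) st) st).2.2.2 =
      st.2.2.2 + (rs.map (fun r => ((List.range n).countP (fun c => decide (r + c = n - 1) && mark r c) : Int))).sum := by
  induction rs generalizing st with
  | nil => simp
  | cons r rs ih =>
    have hr : r < st.1.length := hrs r (by simp)
    obtain ⟨iL1, iL2, iH1, iH2, iH3, iH4⟩ := aInner_char mark n r (List.range n) st hr
      (fun c hc => lt_of_lt_of_le (List.mem_range.mp hc) hn)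
    set st1 := (List.range n).foldl (aStep mark n r) st with hst1
    obtain ⟨L1, L2, H1, H2, H3, H4⟩ := ih (st := st1)
      (fun x hx => by rw [iL1]; exact hrs x (by simp [hx]))
      (by rw [iL2]; exact hn)
    rw [List.foldl_cons]
    refine ⟨by rw [L1, iL1], by rw [L2, iL2], ?_, ?_, ?_, ?_⟩
    · intro i
      rw [H1 i, iH1 i]
      simp only [List.map_cons, List.sum_cons]
      ring
    · intro j
      rw [H2 j, iH2 j]
      simp only [List.map_cons, List.sum_cons]
      ring
    · rw [H3, iH3]; simp only [List.map_cons, List.sum_cons]; ring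
    · rw [H4, iH4]; simp only [List.map_cons, List.sum_cons]; ring

lemma countP_single {l : List Nat} (hl : l.Nodup) (j : Nat) (p : Nat → Bool) :
    l.countP (fun c => decide (c = j) && p c) = if j ∈ l then (if p j then 1 else 0) else 0 := by
  induction l with
  | nil => simp
  | cons a l ih =>
    rcases List.nodup_cons.mp hl with ⟨ha, hl'⟩
    rw [List.countP_cons, ih hl']
    by_cases hj : a = j
    · subst hj
      simp [ha]
    · simp [hj, Ne.symm hj]

lemma sum_single {l : List Nat} (hl : l.Nodup) {i : Nat} (hi : i ∈ l) (f : Nat → Int) :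
    (l.map (fun r => if i = r then f r else 0)).sum = f i := by
  induction l with
  | nil => simp at hi
  | cons a l ih =>
    rcases List.nodup_cons.mp hl with ⟨ha, hl'⟩
    rcases List.mem_cons.mp hi with h | h
    · subst h
      have : ∀ x ∈ l.map (fun r => if i = r then f r else 0), x = 0 := by
        intro x hx
        rcases List.mem_map.mp hx with ⟨r, hr, hxe⟩
        have : i ≠ r := fun he => ha (he ▸ hr)
        simpa [this] using hxe.symm
      simp [List.sum_eq_zero this]
    · have hne : i ≠ a := fun he => ha (he ▸ h)
      simp [hne, ih hl' h]

lemma full_line_div (n : Nat) (hn : 0 < n) (p : Nat → Bool) :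
    PySem.Int.floordiv (((List.range n).countP p : Nat) : Int) (n : Int) =
      (if (List.range n).all p then (1 : Int) else 0) := by
  rw [PySem.Int.floordiv_natCast]
  have hle : (List.range n).countP p ≤ n := by
    simpa using List.countP_le_length (p := p) (l := List.range n)
  by_cases hall : (List.range n).all p = true
  · have hce : (List.range n).countP p = n := by
      have := List.countP_eq_length.mpr (List.all_eq_true.mp hall)
      simpa using this
    simp [hce, Nat.div_self hn, hall]
  · have hcn : (List.range n).countP p ≠ n := by
      intro hc
      exact hall (List.all_eq_true.mpr (List.countP_eq_length.mp (by
        rw [hc]; simp)))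
    simp [Nat.div_eq_of_lt (lt_of_le_of_ne hle hcn), hall]

lemma full_line_decide (n : Nat) (c : Nat) (p : Nat → Bool) (h : c = (List.range n).countP p) :
    (decide ((c : Int) = (n : Int))) = (List.range n).all p := by
  subst h
  by_cases hall : (List.range n).all p = true
  · have hce : (List.range n).countP p = n := by
      have := List.countP_eq_length.mpr (List.all_eq_true.mp hall)
      simpa using this
    simp [hce, hall]
  · have hcn : (List.range n).countP p ≠ n := by
      intro hc
      exact hall (List.all_eq_true.mpr (List.countP_eq_length.mp (by simpa using hc)))
    simp [hall, hcn]

-- ===== VERDICT (by name: the statement is the Claim_ definition above) =====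
theorem solution_spec : Claim_equal_solution := by
  intro board nums _ hPre
  unfold Spec_solution
  obtain ⟨hne, -⟩ := hPre
  simp only [solution, solution_alt]
  set numbers := PySem.Set.ofList nums with hnum
  set n := board.length with hN
  have hn : 0 < n := by simpa [hN, List.length_pos_iff] using hne
  set mark := markAt board numbers with hmark
  obtain ⟨L1, L2, H1, H2, H3, H4⟩ := aOuter_char mark n (List.range n)
    (List.replicate n (0 : Int), List.replicate n (0 : Int), (0 : Int), (0 : Int))
    (by intro r hrr; simpa using List.mem_range.mp hrr)
    (by simp)
  set st := (List.range n).foldl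
      (fun st r => (List.range n).foldl (aStep mark n r) st)
      (List.replicate n (0 : Int), List.replicate n (0 : Int), (0 : Int), (0 : Int)) with hst
  -- right diagonal counter
  have e3 : st.2.2.1 = (((List.range n).countP (fun r => mark r r) : Nat) : Int) := by
    rw [hst, H3]
    have hcg : ∀ r ∈ List.range n,
        (((List.range n).countP (fun c => decide (r = c) && mark r c) : Nat) : Int) =
          (if mark r r then (1 : Int) else 0) := by
      intro r hr
      have h1 : (List.range n).countP (fun c => decide (r = c) && mark r c) =
          (List.range n).countP (fun c => decide (c = r) && mark r c) :=
        List.countP_congr (by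
          intro x hx
          simp only [Bool.and_eq_true, decide_eq_true_eq]
          constructor
          · rintro ⟨he, hm⟩; exact ⟨he.symm, hm⟩
          · rintro ⟨he, hm⟩; exact ⟨he.symm, hm⟩)
      rw [h1, countP_single List.nodup_range r (mark r)]
      rw [if_pos hr]
      split <;> simp
    rw [List.map_congr_left hcg, countP_int_sum]
    simp
  -- left diagonal counter
  have e4 : st.2.2.2 = (((List.range n).countP (fun r => mark r (n - 1 - r)) : Nat) : Int) := by
    rw [hst, H4]
    have hcg : ∀ r ∈ List.range n,
        (((List.range n).countP (fun c => decide (r + c = n - 1) && mark r c) : Nat) : Int) =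
          (if mark r (n - 1 - r) then (1 : Int) else 0) := by
      intro r hr
      have hrn : r < n := List.mem_range.mp hr
      have h1 : (List.range n).countP (fun c => decide (r + c = n - 1) && mark r c) =
          (List.range n).countP (fun c => decide (c = n - 1 - r) && mark r c) :=
        List.countP_congr (by
          intro x hx
          have hxn : x < n := List.mem_range.mp hx
          simp only [Bool.and_eq_true, decide_eq_true_eq]
          constructor
          · rintro ⟨he, hm⟩
            exact ⟨by omega, hm⟩
          · rintro ⟨he, hm⟩
            exact ⟨by omega, hm⟩)
      rw [h1, countP_single List.nodup_range (n - 1 - r) (mark r)]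
      rw [if_pos (List.mem_range.mpr (show n - 1 - r < n by omega))]
      split <;> simp
    rw [List.map_congr_left hcg, countP_int_sum]
    simp
  -- row counters
  have erow : ∀ i, i < n → st.1.getD i 0 = (((List.range n).countP (mark i) : Nat) : Int) := by
    intro i hi
    rw [hst, H1 i]
    rw [sum_single List.nodup_range (List.mem_range.mpr hi)
      (fun r => (((List.range n).countP (mark r) : Nat) : Int))]
    simp
  -- column counters
  have ecol : ∀ j, j < n → st.2.1.getD j 0 = (((List.range n).countP (fun r => mark r j) : Nat) : Int) := by
    intro j hj
    rw [hst, H2 j]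
    have hcg : ∀ r ∈ List.range n,
        (((List.range n).countP (fun c => decide (c = j) && mark r c) : Nat) : Int) =
          (if mark r j then (1 : Int) else 0) := by
      intro r hr
      rw [countP_single List.nodup_range j (mark r)]
      rw [if_pos (List.mem_range.mpr hj)]
      split <;> simp
    rw [List.map_congr_left hcg, countP_int_sum]
    simp
  -- the two trailing sums
  have hrows : (List.range n).foldl (fun a i => if st.1.getD i 0 = (n : Int) then a + 1 else a) 0 =
      (((List.range n).countP (fun i => (List.range n).all (mark i)) : Nat) : Int) := by
    rw [PySem.List.foldl_ite_add_one (fun i => st.1.getD i 0 = (n : Int)) (List.range n) 0]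
    rw [List.countP_congr (q := fun i => (List.range n).all (mark i)) (by
      intro i hi
      have hin : i < n := List.mem_range.mp hi
      rw [show (decide (st.1.getD i 0 = (n : Int))) =
          (List.range n).all (mark i) from by
        rw [erow i hin]
        exact full_line_decide n _ (mark i) rfl])]
    simp
  have hcols : (List.range n).foldl (fun a i => if st.2.1.getD i 0 = (n : Int) then a + 1 else a) 0 =
      (((List.range n).countP (fun j => (List.range n).all (fun r => mark r j)) : Nat) : Int) := by
    rw [PySem.List.foldl_ite_add_one (fun i => st.2.1.getD i 0 = (n : Int)) (List.range n) 0]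
    rw [List.countP_congr (q := fun j => (List.range n).all (fun r => mark r j)) (by
      intro j hj
      have hjn : j < n := List.mem_range.mp hj
      rw [show (decide (st.2.1.getD j 0 = (n : Int))) =
          (List.range n).all (fun r => mark r j) from by
        rw [ecol j hjn]
        exact full_line_decide n _ (fun r => mark r j) rfl])]
    simp
  rw [e3, e4, hrows, hcols, full_line_div n hn _, full_line_div n hn _]
  ring
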